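-- pv_equiv track=rewrite | github.com/joshua-j-hong/optimal_transport | AccAlign/aer.py | calculate_null_alignments
-- ===== SOURCE A (Python) =====
-- def calculate_null_alignments(gold_labels, predicted, source, target):
--     """ Count the number of words with no alignments and how many are captured by the predicted alignments
--     """
--     gold_source = set(x[0] for x in gold_labels)
--     gold_target = set(x[1] for x in gold_labels)
--     predicted_source = set(x[0] for x in predicted)
--     predicted_target = set(x[1] for x in predicted)
--
--     gold_null_source_indices = set(range(len(source))) - gold_source
--     gold_null_target_indices = set(range(len(target))) - gold_target
--
--     pred_null_source_indices = set(range(len(source))) - predicted_source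
--     pred_null_target_indices = set(range(len(target))) - predicted_target
--
--     true_positive = len(gold_null_source_indices & pred_null_source_indices) + len(gold_null_target_indices & pred_null_target_indices)
--     false_negative = len(gold_null_source_indices - pred_null_source_indices) + len(gold_null_target_indices - pred_null_target_indices)
--     false_positive = len(pred_null_source_indices - gold_null_source_indices) + len(pred_null_target_indices - gold_null_target_indices)
--
--     return true_positive, false_negative, false_positive
-- ===== SOURCE B (Python) =====
-- def calculate_null_alignments(gold_labels, predicted, source, target):
--     """Count null-alignment TP/FN/FP with one pass over the indices of each
--     sentence, classifying each index directly instead of building and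
--     intersecting null-index sets."""
--     gold_source = {x[0] for x in gold_labels}
--     gold_target = {x[1] for x in gold_labels}
--     predicted_source = {x[0] for x in predicted}
--     predicted_target = {x[1] for x in predicted}
--
--     true_positive = false_negative = false_positive = 0
--     for indices, gold, pred in ((range(len(source)), gold_source, predicted_source),
--                                 (range(len(target)), gold_target, predicted_target)):
--         for i in indices:
--             g = i not in gold
--             p = i not in pred
--             if g and p:
--                 true_positive += 1
--             elif g:
--                 false_negative += 1
--             elif p:
--                 false_positive += 1
--     return true_positive, false_negative, false_positive
-- ===== Notes on version B (the rewrite author's own statement) =====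
-- stated objective: simpler
-- what changed: Drops the four null-index sets and the six set difference/intersection operations; a single loop over each sentence's indices classifies every index as TP/FN/FP directly from membership in the gold/predicted sets.
import Mathlib
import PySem

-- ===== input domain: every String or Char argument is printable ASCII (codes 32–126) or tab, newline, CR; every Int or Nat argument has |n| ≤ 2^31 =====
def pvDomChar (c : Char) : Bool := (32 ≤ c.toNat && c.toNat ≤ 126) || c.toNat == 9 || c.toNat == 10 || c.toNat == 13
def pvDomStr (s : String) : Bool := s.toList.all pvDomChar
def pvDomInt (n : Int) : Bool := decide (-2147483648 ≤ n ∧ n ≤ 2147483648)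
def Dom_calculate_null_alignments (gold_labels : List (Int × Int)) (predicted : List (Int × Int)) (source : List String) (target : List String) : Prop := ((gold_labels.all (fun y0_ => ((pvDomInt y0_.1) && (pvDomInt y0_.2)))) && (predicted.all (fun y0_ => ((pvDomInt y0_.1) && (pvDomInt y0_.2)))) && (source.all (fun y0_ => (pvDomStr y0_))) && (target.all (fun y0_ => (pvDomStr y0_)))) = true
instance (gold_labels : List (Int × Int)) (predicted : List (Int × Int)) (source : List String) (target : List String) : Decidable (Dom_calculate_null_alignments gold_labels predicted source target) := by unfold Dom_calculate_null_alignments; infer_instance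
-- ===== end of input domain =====

-- B replaces A's four null-index sets and six set operations by a single pass over each
-- sentence's indices that classifies every index as TP/FN/FP directly (objective: simpler).


-- ===== PORT A =====
def calculate_null_alignments (gold_labels : List (Int × Int)) (predicted : List (Int × Int)) (source : List String) (target : List String) : Int × Int × Int :=
  let gold_source : PySem.Set Int := PySem.Set.ofList (gold_labels.map Prod.fst)
  let gold_target : PySem.Set Int := PySem.Set.ofList (gold_labels.map Prod.snd)
  let predicted_source : PySem.Set Int := PySem.Set.ofList (predicted.map Prod.fst)
  let predicted_target : PySem.Set Int := PySem.Set.ofList (predicted.map Prod.snd)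
  let gold_null_source_indices := PySem.Set.diff (PySem.Set.ofList (PySem.List.pyRange 0 (source.length : Int))) gold_source
  let gold_null_target_indices := PySem.Set.diff (PySem.Set.ofList (PySem.List.pyRange 0 (target.length : Int))) gold_target
  let pred_null_source_indices := PySem.Set.diff (PySem.Set.ofList (PySem.List.pyRange 0 (source.length : Int))) predicted_source
  let pred_null_target_indices := PySem.Set.diff (PySem.Set.ofList (PySem.List.pyRange 0 (target.length : Int))) predicted_target
  let true_positive := PySem.Set.len (PySem.Set.inter gold_null_source_indices pred_null_source_indices) + PySem.Set.len (PySem.Set.inter gold_null_target_indices pred_null_target_indices)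
  let false_negative := PySem.Set.len (PySem.Set.diff gold_null_source_indices pred_null_source_indices) + PySem.Set.len (PySem.Set.diff gold_null_target_indices pred_null_target_indices)
  let false_positive := PySem.Set.len (PySem.Set.diff pred_null_source_indices gold_null_source_indices) + PySem.Set.len (PySem.Set.diff pred_null_target_indices gold_null_target_indices)
  (true_positive, false_negative, false_positive)

-- ===== PORT B =====
-- the body of B's inner loop: classify index i as TP / FN / FP
def cnaStep (gold pred : PySem.Set Int) (acc : Int × Int × Int) (i : Int) : Int × Int × Int :=
  let g := !(PySem.Set.contains gold i)
  let p := !(PySem.Set.contains pred i)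
  if g && p then (acc.1 + 1, acc.2.1, acc.2.2)
  else if g then (acc.1, acc.2.1 + 1, acc.2.2)
  else if p then (acc.1, acc.2.1, acc.2.2 + 1)
  else acc

def calculate_null_alignments_alt (gold_labels : List (Int × Int)) (predicted : List (Int × Int)) (source : List String) (target : List String) : Int × Int × Int :=
  let gold_source : PySem.Set Int := PySem.Set.ofList (gold_labels.map Prod.fst)
  let gold_target : PySem.Set Int := PySem.Set.ofList (gold_labels.map Prod.snd)
  let predicted_source : PySem.Set Int := PySem.Set.ofList (predicted.map Prod.fst)
  let predicted_target : PySem.Set Int := PySem.Set.ofList (predicted.map Prod.snd)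
  let acc := (PySem.List.pyRange 0 (source.length : Int)).foldl (cnaStep gold_source predicted_source) (0, 0, 0)
  (PySem.List.pyRange 0 (target.length : Int)).foldl (cnaStep gold_target predicted_target) acc

-- ===== PRECONDITION & SPEC =====
def Spec_calculate_null_alignments (gold_labels : List (Int × Int)) (predicted : List (Int × Int)) (source : List String) (target : List String) (out : Int × Int × Int) : Prop := out = calculate_null_alignments_alt gold_labels predicted source target
instance (gold_labels : List (Int × Int)) (predicted : List (Int × Int)) (source : List String) (target : List String) (out : Int × Int × Int) : Decidable (Spec_calculate_null_alignments gold_labels predicted source target out) := by unfold Spec_calculate_null_alignments; infer_instance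

-- ===== CLAIM (what is proved, stated in full; the proofs are below) =====
def Claim_equal_calculate_null_alignments : Prop := ∀ (gold_labels : List (Int × Int)) (predicted : List (Int × Int)) (source : List String) (target : List String), Dom_calculate_null_alignments gold_labels predicted source target → Spec_calculate_null_alignments gold_labels predicted source target (calculate_null_alignments gold_labels predicted source target)

-- ===== LEMMAS AND PROOFS =====

-- B's loop accumulates the three disjoint counts
theorem cna_foldl (gold pred : PySem.Set Int) (l : List Int) (a b c : Int) :
    l.foldl (cnaStep gold pred) (a, b, c) =
      (a + (l.countP (fun i => !(PySem.Set.contains gold i) && !(PySem.Set.contains pred i)) : Int),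
       b + (l.countP (fun i => !(PySem.Set.contains gold i) && PySem.Set.contains pred i) : Int),
       c + (l.countP (fun i => PySem.Set.contains gold i && !(PySem.Set.contains pred i)) : Int)) := by
  induction l generalizing a b c with
  | nil => simp
  | cons x xs ih =>
    simp only [List.foldl_cons, List.countP_cons, cnaStep]
    cases hg : PySem.Set.contains gold x <;> cases hp : PySem.Set.contains pred x <;>
      simp [ih, hg, hp] <;> push_cast <;> ring

-- membership in a filtered list, as Bool, for elements of the base list
theorem contains_filter_of_mem (rng : List Int) (q : Int → Bool) (x : Int) (hx : x ∈ rng) :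
    (rng.filter q).contains x = q x := by
  rw [List.contains_eq_mem]
  simp [List.mem_filter, hx]

-- on a duplicate-free base list, A's filter-of-filter is a single filter by the conjunction
theorem filter_set_filter (rng : List Int) (q q' : Int → Bool) :
    (rng.filter q).filter (fun x => (rng.filter q').contains x) =
      rng.filter (fun x => q' x && q x) := by
  rw [List.filter_congr (q := fun x => q' x)
      (fun x hx => contains_filter_of_mem rng q' x (List.mem_of_mem_filter hx)),
    List.filter_filter]

theorem filter_set_filter_not (rng : List Int) (q q' : Int → Bool) :
    (rng.filter q).filter (fun x => !(rng.filter q').contains x) =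
      rng.filter (fun x => !q' x && q x) := by
  rw [List.filter_congr (q := fun x => !q' x)
      (fun x hx => by rw [contains_filter_of_mem rng q' x (List.mem_of_mem_filter hx)]),
    List.filter_filter]

theorem nodup_pyRange_zero (n : Nat) : (PySem.List.pyRange 0 (n : Int)).Nodup := by
  rw [PySem.List.pyRange_zero_natCast]
  exact List.nodup_range.map (fun a b h => by exact_mod_cast h)

-- the three set-size terms of one side of A, as counts over the index range
theorem cna_side (gold pred : PySem.Set Int) (n : Nat) :
    (PySem.Set.len (PySem.Set.inter (PySem.Set.diff (PySem.Set.ofList (PySem.List.pyRange 0 (n : Int))) gold) (PySem.Set.diff (PySem.Set.ofList (PySem.List.pyRange 0 (n : Int))) pred)) =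
      ((PySem.List.pyRange 0 (n : Int)).countP (fun i => !(PySem.Set.contains gold i) && !(PySem.Set.contains pred i)) : Int)) ∧
    (PySem.Set.len (PySem.Set.diff (PySem.Set.diff (PySem.Set.ofList (PySem.List.pyRange 0 (n : Int))) gold) (PySem.Set.diff (PySem.Set.ofList (PySem.List.pyRange 0 (n : Int))) pred)) =
      ((PySem.List.pyRange 0 (n : Int)).countP (fun i => !(PySem.Set.contains gold i) && PySem.Set.contains pred i) : Int)) ∧
    (PySem.Set.len (PySem.Set.diff (PySem.Set.diff (PySem.Set.ofList (PySem.List.pyRange 0 (n : Int))) pred) (PySem.Set.diff (PySem.Set.ofList (PySem.List.pyRange 0 (n : Int))) gold)) =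
      ((PySem.List.pyRange 0 (n : Int)).countP (fun i => PySem.Set.contains gold i && !(PySem.Set.contains pred i)) : Int)) := by
  have hself := PySem.Set.ofList_eq_self_of_nodup _ (nodup_pyRange_zero n)
  refine ⟨?_, ?_, ?_⟩ <;>
  · simp only [PySem.Set.len, PySem.Set.inter, PySem.Set.diff, hself, PySem.Set.contains,
      filter_set_filter, filter_set_filter_not, List.countP_eq_length_filter]
    congr 1
    apply congrArg
    apply List.filter_congr
    intro x _
    simp [Bool.and_comm]

-- ===== VERDICT (by name: the statement is the Claim_ definition above) =====
theorem calculate_null_alignments_spec : Claim_equal_calculate_null_alignments := by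
  intro gold_labels predicted source target _
  unfold Spec_calculate_null_alignments calculate_null_alignments calculate_null_alignments_alt
  obtain ⟨hs1, hs2, hs3⟩ := cna_side (PySem.Set.ofList (gold_labels.map Prod.fst)) (PySem.Set.ofList (predicted.map Prod.fst)) source.length
  obtain ⟨ht1, ht2, ht3⟩ := cna_side (PySem.Set.ofList (gold_labels.map Prod.snd)) (PySem.Set.ofList (predicted.map Prod.snd)) target.length
  simp only [cna_foldl, hs1, hs2, hs3, ht1, ht2, ht3]
  refine Prod.ext ?_ (Prod.ext ?_ ?_) <;> push_cast <;> ring
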